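-- pv_equiv track=rewrite | github.com/frankstapel/advent-of-code | 2024/17/main.py | execute_faster
-- ===== SOURCE A (Python) =====
-- def execute_faster(a, b, c):
--     result = []
--     while a > 0:
--         b = a % 8 ^ 1
--         c = a // 2**b
--         b = b ^ 5 ^ c
--         result.append(b % 8)
--         a = a // 8
--     return result
-- ===== SOURCE B (Python) =====
-- def _digit(v):
--     e = v % 8 ^ 1
--     return (e ^ 5 ^ v // 2 ** e) % 8
--
--
-- def execute_faster(a, b, c):
--     # b and c are dead on entry: each output digit depends only on a // 8**i.
--     if a <= 0:
--         return []
--     n = (a.bit_length() - 1) // 3 + 1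
--     return [_digit(a // 8 ** i) for i in range(n)]
-- ===== Notes on version B (the rewrite author's own statement) =====
-- stated objective: alternative
-- what changed: Since b and c are overwritten before they are ever read, each output digit depends only on a//8**i; B computes the octal digit count in closed form from a.bit_length() and maps an independent per-digit function over the positions, instead of threading mutated a/b/c state through a while loop with an accumulator.
import Mathlib
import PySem

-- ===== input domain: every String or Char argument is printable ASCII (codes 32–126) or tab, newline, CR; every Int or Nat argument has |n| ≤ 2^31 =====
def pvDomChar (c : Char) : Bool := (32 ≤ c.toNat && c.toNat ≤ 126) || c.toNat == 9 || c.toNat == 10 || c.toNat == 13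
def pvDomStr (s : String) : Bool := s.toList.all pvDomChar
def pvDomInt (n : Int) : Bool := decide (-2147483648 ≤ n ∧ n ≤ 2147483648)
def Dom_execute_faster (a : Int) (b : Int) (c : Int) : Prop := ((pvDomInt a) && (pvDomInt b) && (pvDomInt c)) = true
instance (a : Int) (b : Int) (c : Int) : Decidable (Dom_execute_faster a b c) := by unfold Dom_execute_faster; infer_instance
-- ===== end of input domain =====

-- B replaces A's state-threading while loop by a closed-form digit count plus an
-- independent per-position computation (objective: alternative decomposition, same cost).

-- ===== PORT A =====
-- the while loop: state (a, b, c, result); b and c are reassigned each iteration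
def pvGoA (a b c : Int) (result : List Int) : List Int :=
  if h : 0 < a then
    let b1 := PySem.Int.bxor (PySem.Int.mod a 8) 1          -- b = a % 8 ^ 1
    let c1 := PySem.Int.floordiv a (2 ^ b1.toNat)           -- c = a // 2**b  (b ≥ 0 here, so 2**b = 2 ^ b.toNat exactly)
    let b2 := PySem.Int.bxor (PySem.Int.bxor b1 5) c1       -- b = b ^ 5 ^ c
    pvGoA (PySem.Int.floordiv a 8) b2 c1 (result ++ [PySem.Int.mod b2 8])
  else result
termination_by a.toNat
decreasing_by
  have h8 : PySem.Int.floordiv a 8 = a / 8 := PySem.Int.floordiv_eq_ediv_of_pos (by norm_num)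
  rw [h8]; omega

def execute_faster (a : Int) (b : Int) (c : Int) : List Int := pvGoA a b c []

-- ===== PORT B =====
def pvDigit (v : Int) : Int :=
  let e := PySem.Int.bxor (PySem.Int.mod v 8) 1
  PySem.Int.mod (PySem.Int.bxor (PySem.Int.bxor e 5) (PySem.Int.floordiv v (2 ^ e.toNat))) 8

def execute_faster_alt (a : Int) (b : Int) (c : Int) : List Int :=
  if a ≤ 0 then []
  else
    (List.range ((PySem.Int.bitLength a - 1) / 3 + 1)).map
      (fun i => pvDigit (PySem.Int.floordiv a (8 ^ i)))

-- ===== PRECONDITION & SPEC =====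
def Spec_execute_faster (a : Int) (b : Int) (c : Int) (out : List Int) : Prop := out = execute_faster_alt a b c
instance (a : Int) (b : Int) (c : Int) (out : List Int) : Decidable (Spec_execute_faster a b c out) := by unfold Spec_execute_faster; infer_instance

-- ===== CLAIM (what is proved, stated in full; the proofs are below) =====
def Claim_equal_execute_faster : Prop := ∀ (a : Int) (b : Int) (c : Int), Dom_execute_faster a b c → Spec_execute_faster a b c (execute_faster a b c)

-- ===== LEMMAS AND PROOFS =====

-- step values of A's loop body (proof-only helpers)
def pvB1 (a : Int) : Int := PySem.Int.bxor (PySem.Int.mod a 8) 1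
def pvC1 (a : Int) : Int := PySem.Int.floordiv a (2 ^ (pvB1 a).toNat)
def pvB2 (a : Int) : Int := PySem.Int.bxor (PySem.Int.bxor (pvB1 a) 5) (pvC1 a)

theorem pvGoA_neg (a b c : Int) (acc : List Int) (h : ¬ 0 < a) : pvGoA a b c acc = acc := by
  rw [pvGoA]; simp [h]

theorem pvGoA_pos (a b c : Int) (acc : List Int) (h : 0 < a) :
    pvGoA a b c acc = pvGoA (PySem.Int.floordiv a 8) (pvB2 a) (pvC1 a) (acc ++ [pvDigit a]) := by
  rw [pvGoA, dif_pos h]; rfl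

theorem fd_pos_eq (a k : Int) (hk : 0 < k) : PySem.Int.floordiv a k = a / k :=
  PySem.Int.floordiv_eq_ediv_of_pos hk

-- a//8//8^i = a//8^(i+1)
theorem fd_fd (a : Int) (i : Nat) :
    PySem.Int.floordiv (PySem.Int.floordiv a 8) (8 ^ i) = PySem.Int.floordiv a (8 ^ (i + 1)) := by
  rw [fd_pos_eq _ _ (by norm_num), fd_pos_eq _ _ (by positivity), fd_pos_eq _ _ (by positivity)]
  rw [Int.ediv_ediv_of_nonneg (by norm_num)]
  congr 1
  rw [pow_succ]
  ring

-- accumulator lemma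
theorem pvGoA_acc_aux : ∀ (n : Nat) (a b c : Int), a.toNat ≤ n → ∀ acc,
    pvGoA a b c acc = acc ++ pvGoA a b c [] := by
  intro n
  induction n with
  | zero =>
    intro a b c ha acc
    have h : ¬ 0 < a := by omega
    rw [pvGoA_neg _ _ _ _ h, pvGoA_neg _ _ _ _ h]
    simp
  | succ n ih =>
    intro a b c ha acc
    by_cases h : 0 < a
    · rw [pvGoA_pos _ _ _ _ h, pvGoA_pos _ _ _ _ h]
      have hlt : (PySem.Int.floordiv a 8).toNat ≤ n := by
        rw [fd_pos_eq _ _ (by norm_num)]; omega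
      rw [ih _ _ _ hlt, ih _ _ _ hlt (List.nil ++ _)]
      simp
    · rw [pvGoA_neg _ _ _ _ h, pvGoA_neg _ _ _ _ h]
      simp

theorem pvGoA_acc (a b c : Int) (acc : List Int) : pvGoA a b c acc = acc ++ pvGoA a b c [] :=
  pvGoA_acc_aux a.toNat a b c le_rfl acc

-- A's loop produces pvDigit a in front
theorem pvGoA_cons (a b c : Int) (h : 0 < a) :
    ∃ b' c', pvGoA a b c [] = pvDigit a :: pvGoA (PySem.Int.floordiv a 8) b' c' [] := by
  refine ⟨pvB2 a, pvC1 a, ?_⟩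
  rw [pvGoA_pos _ _ _ _ h, pvGoA_acc]
  simp

-- bit length drops by 3 when dividing a ≥ 8 by 8
theorem bitLength_fd8 (a : Int) (h8 : 8 ≤ a) :
    PySem.Int.bitLength (PySem.Int.floordiv a 8) + 3 = PySem.Int.bitLength a := by
  have e2 : PySem.Int.floordiv a 2 = a / 2 := fd_pos_eq _ _ (by norm_num)
  have e2' : PySem.Int.floordiv (a / 2) 2 = a / 2 / 2 := fd_pos_eq _ _ (by norm_num)
  have e2'' : PySem.Int.floordiv (a / 2 / 2) 2 = a / 2 / 2 / 2 := fd_pos_eq _ _ (by norm_num)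
  have e8 : PySem.Int.floordiv a 8 = a / 2 / 2 / 2 := by
    rw [fd_pos_eq _ _ (by norm_num)]; omega
  have h1 := PySem.Int.bitLength_of_pos (n := a) (by omega)
  have h2 := PySem.Int.bitLength_of_pos (n := a / 2) (by omega)
  have h3 := PySem.Int.bitLength_of_pos (n := a / 2 / 2) (by omega)
  rw [h1, e2, h2, e2', h3, e2'', e8]

theorem bitLength_ge_four (a : Int) (h8 : 8 ≤ a) : 4 ≤ PySem.Int.bitLength a := by
  have h := PySem.Int.lt_two_pow_bitLength a
  have hna : 8 ≤ a.natAbs := by omega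
  have hlt : (2 : Nat) ^ 3 < 2 ^ (PySem.Int.bitLength a) := by omega
  have := (Nat.pow_lt_pow_iff_right (a := 2) (by norm_num)).mp hlt
  omega

theorem bitLength_le_three (a : Int) (h1 : 1 ≤ a) (h8 : a < 8) : PySem.Int.bitLength a ≤ 3 := by
  have h := PySem.Int.two_pow_bitLength_le a (by omega)
  have hna : a.natAbs ≤ 7 := by omega
  by_contra hc
  have h3 : (2 : Nat) ^ 3 ≤ 2 ^ (PySem.Int.bitLength a - 1) :=
    Nat.pow_le_pow_right (by norm_num) (by omega)
  omega

-- B's list unfolds the same way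
theorem alt_cons (a b c : Int) (h : 0 < a) :
    execute_faster_alt a b c = pvDigit a :: execute_faster_alt (PySem.Int.floordiv a 8) b c := by
  by_cases h8 : 8 ≤ a
  · have hfd : (0 : Int) < PySem.Int.floordiv a 8 := by
      rw [fd_pos_eq _ _ (by norm_num)]; omega
    have hbl := bitLength_fd8 a h8
    have hbl4 := bitLength_ge_four a h8
    rw [execute_faster_alt, execute_faster_alt]
    rw [if_neg (by omega), if_neg (by omega)]
    have hn : (PySem.Int.bitLength a - 1) / 3 + 1
        = ((PySem.Int.bitLength (PySem.Int.floordiv a 8) - 1) / 3 + 1) + 1 := by omega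
    rw [hn, List.range_succ_eq_map, List.map_cons, List.map_map]
    congr 1
    · simp
    · apply List.map_congr_left
      intro i _
      simp only [Function.comp_apply, Nat.succ_eq_add_one]
      rw [← fd_fd]
  · -- 1 ≤ a < 8 : one digit, and a // 8 = 0
    have hfd : PySem.Int.floordiv a 8 = 0 := by
      rw [fd_pos_eq _ _ (by norm_num)]; omega
    have hble := bitLength_le_three a (by omega) (by omega)
    rw [execute_faster_alt, execute_faster_alt, hfd]
    rw [if_neg (by omega), if_pos (by omega)]
    have hn : (PySem.Int.bitLength a - 1) / 3 + 1 = 1 := by omega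
    rw [hn]
    simp

theorem main_aux : ∀ (n : Nat) (a b c : Int), a.toNat ≤ n →
    pvGoA a b c [] = execute_faster_alt a b c := by
  intro n
  induction n with
  | zero =>
    intro a b c ha
    have h : ¬ 0 < a := by omega
    rw [pvGoA_neg _ _ _ _ h, execute_faster_alt]
    simp [show a ≤ 0 by omega]
  | succ n ih =>
    intro a b c ha
    by_cases h : 0 < a
    · obtain ⟨b', c', hg⟩ := pvGoA_cons a b c h
      have hlt : (PySem.Int.floordiv a 8).toNat ≤ n := by
        rw [fd_pos_eq _ _ (by norm_num)]; omega
      rw [hg, ih _ _ _ hlt, alt_cons a b c h]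
      rfl
    · rw [pvGoA_neg _ _ _ _ h, execute_faster_alt]
      simp [show a ≤ 0 by omega]

theorem main_eq (a b c : Int) : pvGoA a b c [] = execute_faster_alt a b c :=
  main_aux a.toNat a b c le_rfl

-- ===== VERDICT (by name: the statement is the Claim_ definition above) =====
theorem execute_faster_spec : Claim_equal_execute_faster := by
  intro a b c _
  unfold Spec_execute_faster execute_faster
  exact main_eq a b c
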